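-- pv_equiv track=rewrite | github.com/big-endian-exp/OneDrive-organizer | src/utils/validators.py | validate_folder_path
-- ===== SOURCE A (Python) =====
-- def validate_folder_path(path: str) -> bool:
--     """
--     Validate OneDrive folder path format.
--
--     Args:
--         path: Folder path to validate
--
--     Returns:
--         True if valid, False otherwise
--     """
--     if not path:
--         return True  # Empty path means root
--
--     # Check for invalid characters
--     invalid_chars = ['<', '>', ':', '"', '|', '?', '*']
--     if any(char in path for char in invalid_chars):
--         return False
--
--     # Check for invalid path segments
--     segments = path.split('/')
--     for segment in segments:
--         if segment in ['.', '..']: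
--             return False
--         if segment.startswith(' ') or segment.endswith(' '):
--             return False
--
--     return True
-- ===== SOURCE B (Python) =====
-- def validate_folder_path(path: str) -> bool:
--     """Character-level state machine: one scan over path+'/' (no split, no
--     per-substring scans), tracking the current segment's first char, last char,
--     length and whether it is all dots; a '/' finalizes the segment's checks."""
--     if not path:
--         return True
--     first = None
--     last = None
--     n = 0
--     dots = True
--     for c in path + '/':
--         if c == '/':
--             if n != 0 and dots and n <= 2:
--                 return False
--             if first == ' ' or last == ' ':
--                 return False
--             first = None
--             last = None
--             n = 0
--             dots = True
--         elif c in '<>:"|?*':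
--             return False
--         else:
--             if first is None:
--                 first = c
--             last = c
--             n += 1
--             dots = dots and c == '.'
--     return True
-- ===== Notes on version B (the rewrite author's own statement) =====
-- stated objective: alternative
-- what changed: A makes seven whole-string substring scans, splits the path and runs a second loop over the segments; B never splits: it is a single character-level state machine over the separator-terminated path that tracks the current segment's first char, last char, length and all-dots flag and finalizes each segment's checks at every separator.
import Mathlib
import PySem

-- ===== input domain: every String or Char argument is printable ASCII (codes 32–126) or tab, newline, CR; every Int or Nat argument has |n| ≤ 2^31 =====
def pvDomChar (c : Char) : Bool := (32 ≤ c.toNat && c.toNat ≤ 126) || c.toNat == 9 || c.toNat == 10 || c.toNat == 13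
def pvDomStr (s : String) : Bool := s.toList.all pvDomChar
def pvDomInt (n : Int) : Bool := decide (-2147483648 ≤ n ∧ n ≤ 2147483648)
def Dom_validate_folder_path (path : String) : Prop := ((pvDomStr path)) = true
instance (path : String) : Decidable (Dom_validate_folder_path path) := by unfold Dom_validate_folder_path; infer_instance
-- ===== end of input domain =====

-- B replaces A's seven whole-string substring scans + split + segment loop by one character-level
-- state machine over path+'/' that never materialises the segments (objective: alternative).

-- ===== PORT A =====
-- the 'for segment in segments' loop with its early returns
def pvLoopA : List (List Char) → Bool
  | [] => true
  | seg :: rest =>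
    if seg ∈ [['.'], ['.', '.']] then false
    else if PySem.Chars.startswith seg [' '] || PySem.Chars.endswith seg [' '] then false
    else pvLoopA rest

def validate_folder_path (path : String) : Bool :=
  let cs := path.toList
  if cs.isEmpty then true
  else
    let invalid_chars : List (List Char) := [['<'], ['>'], [':'], ['"'], ['|'], ['?'], ['*']]
    if invalid_chars.any (fun ch => PySem.Chars.isIn ch cs) then false
    else pvLoopA (PySem.Chars.splitOn cs ['/'])

-- ===== PORT B =====
def pvInvalid : List Char := ['<', '>', ':', '"', '|', '?', '*']   -- the string '<>:"|?*'

-- Source B's 'for c in path + "/"' loop: state = (first, last, n, dots) of the current segment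
def pvScan : List Char → Option Char → Option Char → Nat → Bool → Bool
  | [], _, _, _, _ => true
  | c :: rest, first, last, n, dots =>
    if c = '/' then
      if n ≠ 0 ∧ dots = true ∧ n ≤ 2 then false
      else if first = some ' ' ∨ last = some ' ' then false
      else pvScan rest none none 0 true
    else if pvInvalid.contains c then false
    else pvScan rest (match first with | none => some c | some f => some f)
           (some c) (n + 1) (dots && (c == '.'))

def validate_folder_path_alt (path : String) : Bool :=
  let cs := path.toList
  if cs.isEmpty then true
  else pvScan (cs ++ ['/']) none none 0 true

-- ===== PRECONDITION & SPEC =====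
def Spec_validate_folder_path (path : String) (out : Bool) : Prop := out = validate_folder_path_alt path
instance (path : String) (out : Bool) : Decidable (Spec_validate_folder_path path out) := by unfold Spec_validate_folder_path; infer_instance

-- ===== CLAIM (what is proved, stated in full; the proofs are below) =====
def Claim_equal_validate_folder_path : Prop := ∀ (path : String), Dom_validate_folder_path path → Spec_validate_folder_path path (validate_folder_path path)

-- ===== LEMMAS AND PROOFS =====

-- splitOn ['/'] as a plain accumulator recursion (to reason about PySem's fuelled go)
def pvSplitAcc : List Char → List Char → List (List Char)
  | [], cur => [cur.reverse]
  | c :: rest, cur => if c = '/' then cur.reverse :: pvSplitAcc rest [] else pvSplitAcc rest (c :: cur)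

-- the same split with the current segment kept in order (B's proof-side view)
def pvSplitF : List Char → List Char → List (List Char)
  | [], cur => [cur]
  | c :: rest, cur => if c = '/' then cur :: pvSplitF rest [] else pvSplitF rest (cur ++ [c])

-- the per-segment predicate both programs enforce
def pvSegOk (seg : List Char) : Bool :=
  if seg = ['.'] ∨ seg = ['.', '.'] then false
  else if seg.head? = some ' ' ∨ seg.getLast? = some ' ' then false
  else true

lemma pv_go_eq (fuel : Nat) (l cur : List Char) (acc : List (List Char)) (h : l.length < fuel) :
    PySem.Chars.splitOn.go ['/'] fuel l cur acc = acc.reverse ++ pvSplitAcc l cur := by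
  induction fuel generalizing l cur acc with
  | zero => omega
  | succ n ih =>
    cases l with
    | nil => simp [PySem.Chars.splitOn.go, pvSplitAcc]
    | cons c rest =>
      by_cases hc : c = '/'
      · subst hc
        rw [PySem.Chars.splitOn.go]
        simp [List.isPrefixOf, pvSplitAcc, ih rest [] _ (by simpa using Nat.lt_of_succ_lt_succ h)]
      · rw [PySem.Chars.splitOn.go]
        simp [List.isPrefixOf, hc, Ne.symm hc, pvSplitAcc,
          ih rest (c :: cur) acc (by simpa using Nat.lt_of_succ_lt_succ h)]

lemma pv_splitOn_eq (cs : List Char) : PySem.Chars.splitOn cs ['/'] = pvSplitAcc cs [] := by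
  unfold PySem.Chars.splitOn
  rw [pv_go_eq _ _ _ _ (by omega)]
  simp

lemma pv_splitAcc_eq_F (l cur : List Char) : pvSplitAcc l cur = pvSplitF l cur.reverse := by
  induction l generalizing cur with
  | nil => simp [pvSplitAcc, pvSplitF]
  | cons c rest ih =>
    by_cases hc : c = '/'
    · subst hc; simp [pvSplitAcc, pvSplitF, ih]
    · simp [pvSplitAcc, pvSplitF, hc, ih (c :: cur)]

lemma pv_singleton_isIn (c : Char) (cs : List Char) : PySem.Chars.isIn [c] cs = cs.contains c := by
  apply Bool.eq_iff_iff.mpr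
  simp only [PySem.Chars.isIn_iff_infix, List.contains_iff_mem]
  constructor
  · rintro ⟨s, t, h⟩
    subst h; simp
  · intro h
    obtain ⟨s, t, rfl⟩ := List.append_of_mem h
    exact ⟨s, t, by simp⟩

-- A's seven whole-string scans = one scan of the string with the combined character test
lemma pv_charScan_eq (cs : List Char) :
    ([['<'], ['>'], [':'], ['"'], ['|'], ['?'], ['*']] : List (List Char)).any
        (fun ch => PySem.Chars.isIn ch cs)
      = cs.any (fun c => pvInvalid.contains c) := by
  apply Bool.eq_iff_iff.mpr
  simp only [List.any_eq_true]
  constructor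
  · rintro ⟨ch, hch, h⟩
    simp only [List.mem_cons, List.not_mem_nil, or_false] at hch
    rcases hch with rfl | rfl | rfl | rfl | rfl | rfl | rfl <;>
      (rw [pv_singleton_isIn, List.contains_iff_mem] at h;
       exact ⟨_, h, by decide⟩)
  · rintro ⟨c, hc, hmem⟩
    have hmem2 : c = '<' ∨ c = '>' ∨ c = ':' ∨ c = '"' ∨ c = '|' ∨ c = '?' ∨ c = '*' := by
      rw [List.contains_iff_mem] at hmem
      simpa [pvInvalid] using hmem
    refine ⟨[c], ?_, by rw [pv_singleton_isIn, List.contains_iff_mem]; exact hc⟩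
    rcases hmem2 with rfl | rfl | rfl | rfl | rfl | rfl | rfl <;> simp

lemma pv_startswith_space (seg : List Char) :
    PySem.Chars.startswith seg [' '] = (seg.head? == some ' ') := by
  apply Bool.eq_iff_iff.mpr
  rw [PySem.Chars.startswith_iff]
  cases seg with
  | nil => simp
  | cons a t => simp [List.cons_prefix_iff]

lemma pv_endswith_space (seg : List Char) :
    PySem.Chars.endswith seg [' '] = (seg.getLast? == some ' ') := by
  apply Bool.eq_iff_iff.mpr
  rw [PySem.Chars.endswith_iff]
  constructor
  · rintro ⟨t, rfl⟩; simp
  · intro h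
    simp only [beq_iff_eq, List.getLast?_eq_some_iff] at h
    obtain ⟨l', rfl⟩ := h
    exact ⟨l', rfl⟩

-- A's segment loop is the conjunction of pvSegOk over the segments
lemma pv_loopA_all (segs : List (List Char)) : pvLoopA segs = segs.all pvSegOk := by
  induction segs with
  | nil => simp [pvLoopA]
  | cons seg rest ih =>
    simp only [pvLoopA, List.all_cons, ih, pvSegOk,
      pv_startswith_space, pv_endswith_space]
    by_cases h1 : seg ∈ [['.'], ['.', '.']]
    · have : seg = ['.'] ∨ seg = ['.', '.'] := by simpa using h1
      simp [h1, this]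
    · have h1' : ¬ (seg = ['.'] ∨ seg = ['.', '.']) := by simpa using h1
      by_cases h2 : seg.head? = some ' ' ∨ seg.getLast? = some ' '
      · rcases h2 with h | h <;> simp [h1, h1', h]
      · push_neg at h2
        simp [h1, h1', h2.1, h2.2]

-- the all-dots state decides the '.'/'..' test
lemma pv_dots_iff (cur : List Char) :
    (cur.length ≠ 0 ∧ cur.all (fun c => c == '.') = true ∧ cur.length ≤ 2) ↔
      (cur = ['.'] ∨ cur = ['.', '.']) := by
  rcases cur with _ | ⟨a, _ | ⟨b, _ | ⟨c, t⟩⟩⟩ <;> simp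

-- core invariant: the scan from mid-segment state equals "no invalid char later"
-- && "all remaining segments ok"
lemma pv_scan_eq (l cur : List Char)
    (h : cur.all (fun c => !pvInvalid.contains c) = true) :
    pvScan (l ++ ['/']) cur.head? cur.getLast? cur.length (cur.all (fun c => c == '.')) =
      (!(l.any (fun c => pvInvalid.contains c)) && (pvSplitF l cur).all pvSegOk) := by
  induction l generalizing cur with
  | nil =>
    simp only [List.nil_append, pvScan, pvSplitF, List.any_nil, Bool.not_false, Bool.true_and,
      List.all_cons, List.all_nil, Bool.and_true]
    by_cases hd : cur.length ≠ 0 ∧ cur.all (fun c => c == '.') = true ∧ cur.length ≤ 2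
    · rw [if_pos hd]
      simp [pvSegOk, (pv_dots_iff cur).mp hd]
    · have hd2 : ¬ (cur = ['.'] ∨ cur = ['.', '.']) := fun hc => hd ((pv_dots_iff cur).mpr hc)
      rw [if_neg hd]
      by_cases hs : cur.head? = some ' ' ∨ cur.getLast? = some ' '
      · rw [if_pos hs]
        simp [pvSegOk, hd2, hs]
      · rw [if_neg hs]
        rcases not_or.mp hs with ⟨hs1, hs2⟩
        simp [pvSegOk, hd2, hs1, hs2]
  | cons c rest ih =>
    by_cases hc : c = '/'
    · subst hc
      have hrec := ih [] (by simp)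
      simp only [List.head?_nil, List.getLast?_nil, List.length_nil, List.all_nil] at hrec
      simp only [List.cons_append, pvScan, pvSplitF, List.any_cons]
      simp only [if_pos trivial]
      rw [hrec]
      have hinv : pvInvalid.contains '/' = false := by decide
      rw [hinv]
      by_cases hd : cur.length ≠ 0 ∧ cur.all (fun c => c == '.') = true ∧ cur.length ≤ 2
      · have hok : pvSegOk cur = false := by simp [pvSegOk, (pv_dots_iff cur).mp hd]
        rw [if_pos hd]
        simp [hok]
      · have hd2 : ¬ (cur = ['.'] ∨ cur = ['.', '.']) := fun hx => hd ((pv_dots_iff cur).mpr hx)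
        rw [if_neg hd]
        by_cases hs : cur.head? = some ' ' ∨ cur.getLast? = some ' '
        · have hok : pvSegOk cur = false := by
            rcases hs with hq | hq <;> simp [pvSegOk, hd2, hq]
          rw [if_pos hs]
          simp [hok]
        · have hok : pvSegOk cur = true := by
            rcases not_or.mp hs with ⟨hs1, hs2⟩
            simp [pvSegOk, hd2, hs1, hs2]
          rw [if_neg hs]
          simp [hok]
    · by_cases hi : pvInvalid.contains c = true
      · simp only [List.cons_append, pvScan]
        rw [if_neg hc, if_pos hi]
        simp only [List.any_cons, hi, Bool.true_or, Bool.not_true, Bool.false_and]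
      · have hi2 : pvInvalid.contains c = false := by
          cases hx : pvInvalid.contains c
          · rfl
          · exact absurd hx hi
        have hupd : (cur ++ [c]).head? = (match cur.head? with
            | none => some c | some f => some f) := by cases cur <;> simp
        have hlast : (cur ++ [c]).getLast? = some c := by simp
        have hall : (cur ++ [c]).all (fun x => x == '.') =
            (cur.all (fun x => x == '.') && (c == '.')) := by simp
        have hlen : (cur ++ [c]).length = cur.length + 1 := by simp
        have hh : (cur ++ [c]).all (fun x => !pvInvalid.contains x) = true := by
          simp_all
        have hrec := ih (cur ++ [c]) hh
        rw [hupd, hlast, hall, hlen] at hrec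
        simp only [List.cons_append, pvScan]
        rw [if_neg hc, if_neg hi, hrec]
        have hsplit : pvSplitF (c :: rest) cur = pvSplitF rest (cur ++ [c]) := by
          simp [pvSplitF, hc]
        rw [hsplit, List.any_cons, hi2]
        simp

-- ===== VERDICT (by name: the statement is the Claim_ definition above) =====
theorem validate_folder_path_spec : Claim_equal_validate_folder_path := by
  intro path _
  unfold Spec_validate_folder_path validate_folder_path validate_folder_path_alt
  set cs := path.toList with hcs
  by_cases he : cs.isEmpty
  · simp [he]
  · simp only [he, Bool.false_eq_true, if_false]
    have hB := pv_scan_eq cs [] (by simp)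
    simp only [List.head?_nil, List.getLast?_nil, List.length_nil, List.all_nil] at hB
    rw [hB, pv_loopA_all, pv_splitOn_eq, pv_splitAcc_eq_F, pv_charScan_eq]
    simp only [List.reverse_nil]
    cases hx : cs.any (fun c => pvInvalid.contains c) <;> simp
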